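-- pv_equiv track=rewrite | github.com/openeuler-mirror/A-Tune | analysis/plugin/configurator/bootloader/bootutils.py | get_keypos
-- ===== SOURCE A (Python) =====
-- def get_keypos(str_content, key):
--     """get key position"""
--     keys = [" " + key + "=", " " + key + " ", " " + key + "\n"]
--     ret = []
--     for k in keys:
--         pos = str_content.rfind(k)
--         if pos != -1:
--             pos += 1
--         ret.append(pos)
--     return max(ret)
-- ===== SOURCE B (Python) =====
-- def get_keypos(str_content, key):
--     """get key position"""
--     target = " " + key
--     n = len(target)
--     best = -1
--     for i in range(len(str_content) - n):
--         if str_content.startswith(target, i) and str_content[i + n] in "= \n":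
--             best = i + 1
--     return best
-- ===== Notes on version B (the rewrite author's own statement) =====
-- stated objective: alternative
-- what changed: Replaces A's three independent rfind scans (one per delimiter pattern) plus max() by a single scan for ' '+key that checks whether the following character is one of '=', ' ', ' ' and keeps the last (rightmost) hit.
import Mathlib
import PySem

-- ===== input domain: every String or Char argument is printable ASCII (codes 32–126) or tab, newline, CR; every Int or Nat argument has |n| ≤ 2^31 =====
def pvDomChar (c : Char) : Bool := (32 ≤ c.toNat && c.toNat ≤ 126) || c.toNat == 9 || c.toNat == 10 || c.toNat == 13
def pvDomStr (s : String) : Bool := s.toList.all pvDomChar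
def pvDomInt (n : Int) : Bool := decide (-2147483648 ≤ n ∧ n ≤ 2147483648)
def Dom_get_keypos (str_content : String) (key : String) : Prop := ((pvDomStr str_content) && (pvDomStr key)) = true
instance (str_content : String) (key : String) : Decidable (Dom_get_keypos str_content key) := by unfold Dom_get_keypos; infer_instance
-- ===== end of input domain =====

-- B replaces A's three independent rfind scans + max by one forward scan for " "+key
-- followed by a delimiter, keeping the last (rightmost) hit; same result, alternative algorithm.

-- ===== PORT A =====
def get_keypos (str_content : String) (key : String) : Int :=
  let keys := [" " ++ key ++ "=", " " ++ key ++ " ", " " ++ key ++ "\n"]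
  let ret := keys.foldl (fun acc k =>
    let pos := PySem.Str.rfind str_content k
    let pos := if pos ≠ -1 then pos + 1 else pos
    acc ++ [pos]) ([] : List Int)
  (PySem.List.max? ret (fun x => x)).getD (-1)

-- ===== PORT B =====
def get_keypos_alt (str_content : String) (key : String) : Int :=
  let cs := str_content.toList
  let target := (" " ++ key).toList
  let n := target.length
  (List.range (cs.length - n)).foldl
    (fun best i =>
      if target.isPrefixOf (cs.drop i) &&
         (cs[i + n]?.any fun c => c == '=' || c == ' ' || c == '\n')
      then ((i : Int) + 1) else best)
    (-1)

-- ===== PRECONDITION & SPEC =====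
def Spec_get_keypos (str_content : String) (key : String) (out : Int) : Prop := out = get_keypos_alt str_content key
instance (str_content : String) (key : String) (out : Int) : Decidable (Spec_get_keypos str_content key out) := by unfold Spec_get_keypos; infer_instance

-- ===== CLAIM (what is proved, stated in full; the proofs are below) =====
def Claim_equal_get_keypos : Prop := ∀ (str_content : String) (key : String), Dom_get_keypos str_content key → Spec_get_keypos str_content key (get_keypos str_content key)

-- ===== LEMMAS AND PROOFS =====

/-- last index `i < m` with `p i`, as an `Int`, `-1` if none. -/
def lastHit (p : Nat → Bool) (m : Nat) : Int :=
  (List.range m).foldl (fun b i => if p i then (i : Int) else b) (-1)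

/-- `A`'s +1 adjustment of an rfind result. -/
def adj (r : Int) : Int := if r ≠ -1 then r + 1 else r

theorem lastHit_succ (p : Nat → Bool) (m : Nat) :
    lastHit p (m + 1) = if p m then (m : Int) else lastHit p m := by
  simp [lastHit, List.range_succ]

theorem lastHit_bounds (p : Nat → Bool) (m : Nat) :
    -1 ≤ lastHit p m ∧ lastHit p m < m := by
  induction m with
  | zero => simp [lastHit]
  | succ m ih =>
    rw [lastHit_succ]
    split <;> push_cast <;> omega

theorem lastHit_or (p q : Nat → Bool) (m : Nat) :
    lastHit (fun i => p i || q i) m = max (lastHit p m) (lastHit q m) := by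
  induction m with
  | zero => simp [lastHit]
  | succ m ih =>
    have hp := lastHit_bounds p m
    have hq := lastHit_bounds q m
    rw [lastHit_succ, lastHit_succ, lastHit_succ, ih]
    by_cases h1 : p m <;> by_cases h2 : q m <;> simp [h1, h2] <;> omega

theorem lastHit_trim (p : Nat → Bool) (m k : Nat)
    (h : ∀ i, m ≤ i → p i = false) : lastHit p (m + k) = lastHit p m := by
  induction k with
  | zero => rfl
  | succ k ih => rw [← Nat.add_assoc, lastHit_succ, h (m + k) (by omega), ih, if_neg (by simp)]

theorem lastHit_trim' (p : Nat → Bool) (m m' : Nat) (hm : m ≤ m')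
    (h : ∀ i, m ≤ i → p i = false) : lastHit p m' = lastHit p m := by
  have := lastHit_trim p m (m' - m) h
  rwa [Nat.add_sub_cancel' hm] at this

theorem rfind_go_eq_lastHit (s sub : List Char) (j : Nat) :
    PySem.Chars.rfind.go s sub j = lastHit (fun i => sub.isPrefixOf (s.drop i)) (j + 1) := by
  induction j with
  | zero => simp [PySem.Chars.rfind.go, lastHit]
  | succ j ih =>
    rw [PySem.Chars.rfind.go, ih]
    exact (lastHit_succ (fun i => sub.isPrefixOf (s.drop i)) (j + 1)).symm

theorem rfind_eq_lastHit (s sub : List Char) :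
    PySem.Chars.rfind s sub = lastHit (fun i => sub.isPrefixOf (s.drop i)) (s.length + 1) :=
  rfind_go_eq_lastHit s sub s.length

theorem adj_max (a b : Int) (ha : -1 ≤ a) (hb : -1 ≤ b) :
    max (adj a) (adj b) = adj (max a b) := by
  unfold adj; split_ifs <;> omega

/-- B's running fold equals `adj` of the last hit. -/
theorem foldl_plus_one (q : Nat → Bool) (m : Nat) :
    (List.range m).foldl (fun b i => if q i then ((i : Int) + 1) else b) (-1)
      = adj (lastHit q m) := by
  induction m with
  | zero => simp [lastHit, adj]
  | succ m ih =>
    have hb := lastHit_bounds q m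
    rw [List.range_succ, List.foldl_append]
    simp only [List.foldl_cons, List.foldl_nil]
    rw [ih]
    by_cases h : q m <;> simp only [h, lastHit_succ, adj, if_true] <;> split_ifs <;> omega

theorem prefix_append_singleton (t : List Char) (d : Char) (l : List Char) :
    (t ++ [d]).isPrefixOf l = (t.isPrefixOf l && (l[t.length]? == some d)) := by
  rw [Bool.eq_iff_iff, List.isPrefixOf_iff_prefix, Bool.and_eq_true,
      List.isPrefixOf_iff_prefix, beq_iff_eq]
  constructor
  · rintro ⟨r, rfl⟩
    refine ⟨⟨d :: r, by simp⟩, ?_⟩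
    rw [List.append_assoc, List.getElem?_append_right (le_refl t.length)]
    simp
  · rintro ⟨⟨r, rfl⟩, hd⟩
    rw [List.getElem?_append_right (le_refl t.length)] at hd
    simp only [Nat.sub_self] at hd
    rcases r with _ | ⟨c, r⟩
    · simp at hd
    · simp only [List.getElem?_cons_zero, Option.some.injEq] at hd
      subst hd
      exact ⟨r, by simp⟩

theorem key_prefix_false_of_big (t : List Char) (d : Char) (cs : List Char) (i : Nat)
    (hi : cs.length - t.length ≤ i) :
    (t ++ [d]).isPrefixOf (cs.drop i) = false := by
  rcases h : (t ++ [d]).isPrefixOf (cs.drop i) with _ | _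
  · rfl
  · exfalso
    rw [List.isPrefixOf_iff_prefix] at h
    have hlen := h.length_le
    rw [List.length_append, List.length_singleton, List.length_drop] at hlen
    omega

/-- the whole equivalence, over char lists. -/
theorem core (cs t : List Char) :
    (PySem.List.max? [
        (if PySem.Chars.rfind cs (t ++ ['=']) ≠ -1 then PySem.Chars.rfind cs (t ++ ['=']) + 1 else PySem.Chars.rfind cs (t ++ ['='])),
        (if PySem.Chars.rfind cs (t ++ [' ']) ≠ -1 then PySem.Chars.rfind cs (t ++ [' ']) + 1 else PySem.Chars.rfind cs (t ++ [' '])),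
        (if PySem.Chars.rfind cs (t ++ ['\n']) ≠ -1 then PySem.Chars.rfind cs (t ++ ['\n']) + 1 else PySem.Chars.rfind cs (t ++ ['\n']))]
      (fun x => x)).getD (-1)
    = (List.range (cs.length - t.length)).foldl
        (fun best i =>
          if t.isPrefixOf (cs.drop i) &&
             (cs[i + t.length]?.any fun c => c == '=' || c == ' ' || c == '\n')
          then ((i : Int) + 1) else best) (-1) := by
  have hadj : ∀ d : Char,
      (if PySem.Chars.rfind cs (t ++ [d]) ≠ -1 then PySem.Chars.rfind cs (t ++ [d]) + 1 else PySem.Chars.rfind cs (t ++ [d]))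
        = adj (lastHit (fun i => (t ++ [d]).isPrefixOf (cs.drop i)) (cs.length + 1)) := by
    intro d; rw [show adj (lastHit (fun i => (t ++ [d]).isPrefixOf (cs.drop i)) (cs.length + 1))
        = adj (PySem.Chars.rfind cs (t ++ [d])) from by rw [rfind_eq_lastHit]]
    rfl
  have heq : ∀ (v1 v2 v3 : Int),
      (PySem.List.max? [v1, v2, v3] (fun x => x)).getD (-1) = max (max v1 v2) v3 := by
    intro v1 v2 v3
    rw [PySem.List.max?_id_cons]; simp [max_def]
  rw [hadj, hadj, hadj, heq]
  rw [adj_max _ _ (lastHit_bounds _ _).1 (lastHit_bounds _ _).1,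
      adj_max _ _ (le_max_of_le_left (lastHit_bounds _ _).1) (lastHit_bounds _ _).1,
      ← lastHit_or, ← lastHit_or]
  have hq : (fun i => ((t ++ ['=']).isPrefixOf (cs.drop i) || (t ++ [' ']).isPrefixOf (cs.drop i))
        || (t ++ ['\n']).isPrefixOf (cs.drop i))
      = fun i => t.isPrefixOf (cs.drop i) &&
          (cs[i + t.length]?.any fun c => c == '=' || c == ' ' || c == '\n') := by
    funext i
    simp only [prefix_append_singleton, ← List.getElem?_drop]
    cases (cs.drop i)[t.length]? with
    | none => simp
    | some c => cases t.isPrefixOf (cs.drop i) <;> simp [Option.any]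
  rw [hq]
  rw [lastHit_trim' _ (cs.length - t.length) (cs.length + 1) (by omega)]
  · exact (foldl_plus_one _ _).symm
  · intro i hi
    rw [← congrFun hq i]
    simp only [Bool.or_eq_false_iff]
    exact ⟨⟨key_prefix_false_of_big t '=' cs i hi, key_prefix_false_of_big t ' ' cs i hi⟩,
      key_prefix_false_of_big t '\n' cs i hi⟩

theorem get_keypos_eq_alt (str_content key : String) :
    get_keypos str_content key = get_keypos_alt str_content key := by
  unfold get_keypos get_keypos_alt
  simp only [List.foldl_cons, List.foldl_nil, List.nil_append, List.cons_append,
    PySem.Str.rfind_eq,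
    show (" " ++ key ++ "=").toList = (" " ++ key).toList ++ ['='] from by simp,
    show (" " ++ key ++ " ").toList = (" " ++ key).toList ++ [' '] from by simp,
    show (" " ++ key ++ "\n").toList = (" " ++ key).toList ++ ['\n'] from by simp]
  exact core str_content.toList (" " ++ key).toList

-- ===== VERDICT (by name: the statement is the Claim_ definition above) =====
theorem get_keypos_spec : Claim_equal_get_keypos := by
  intro s k _
  unfold Spec_get_keypos
  exact get_keypos_eq_alt s k
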